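-- pv_equiv track=rewrite | github.com/CyberMobius/Partition_Number | partition_number_generator.py | calculate_single_number
-- ===== SOURCE A (Python) =====
-- def calculate_single_number(numbers: list[int], indices: list[int]):
--     """Given a list of the first n partition numbers and the indices of the
--     numbers we will end up adding and subtracting, calculate the n+1 partition
--     number.
--
--     Parameters
--     ----------
--     numbers : list[int]
--         The list of the first n partition numbers.
--
--     indices : list[int]
--         The list of indices of the numbers list, such that
--         numbers[-indices[0]] + numbers[-indices[1]] - numbers[-indices[2]] -
--         numbers[-indices[3]] + numbers[-indices[4]] + ... gives is the partition
--         number of n+1. indices[-1] must be a valid index for the numbers list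
--
--     Returns
--     -------
--     int
--         The n+1 partition number
--     """
--
--     cumulative = 0
--     sign = -1
--
--     for n, index in enumerate(indices):
--
--         # Switch from adding to subtracting and vice versa every two terms
--         if n % 2 == 0:
--             sign *= -1
--
--         # Add/subtract the number at the proper index
--         cumulative += sign * numbers[-index]
--
--     return cumulative
-- ===== SOURCE B (Python) =====
-- def calculate_single_number(numbers: list[int], indices: list[int]):
--     """Pair-structured traversal: walk the indices two at a time, giving each
--     pentagonal pair one sign that flips per pair."""
--     total = 0
--     pair_sign = 1
--     for k in range(0, len(indices), 2):
--         term = numbers[-indices[k]]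
--         if k + 1 < len(indices):
--             term += numbers[-indices[k + 1]]
--         total += pair_sign * term
--         pair_sign = -pair_sign
--     return total
-- ===== Notes on version B (the rewrite author's own statement) =====
-- stated objective: alternative
-- what changed: Replaces the per-element loop with a running sign flipped on every even position by a two-at-a-time pair traversal that adds each pair's two terms under one per-pair sign.
import Mathlib
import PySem

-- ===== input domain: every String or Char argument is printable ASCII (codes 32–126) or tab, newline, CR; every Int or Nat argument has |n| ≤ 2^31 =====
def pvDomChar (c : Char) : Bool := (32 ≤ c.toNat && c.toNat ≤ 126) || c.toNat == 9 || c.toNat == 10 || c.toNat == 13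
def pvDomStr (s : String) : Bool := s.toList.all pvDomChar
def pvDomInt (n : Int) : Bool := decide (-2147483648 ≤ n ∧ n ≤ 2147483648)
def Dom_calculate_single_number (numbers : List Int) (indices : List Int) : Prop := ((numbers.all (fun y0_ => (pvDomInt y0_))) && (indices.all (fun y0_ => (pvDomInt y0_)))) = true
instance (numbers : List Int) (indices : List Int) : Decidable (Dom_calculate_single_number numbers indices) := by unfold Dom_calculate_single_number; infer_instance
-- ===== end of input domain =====

-- B replaces the per-element running-sign loop by a two-at-a-time pair traversal (alternative decomposition, same cost).

-- ===== PORT A =====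
-- loop body of A: flip the sign on every even position, then add sign * numbers[-index]
def pvStepA (numbers : List Int) (st : Int × Int) (p : Int × Int) : Int × Int :=
  let sign := if PySem.Int.mod p.1 2 == 0 then -st.2 else st.2
  (st.1 + sign * PySem.List.pyGetD numbers (-p.2) 0, sign)

def calculate_single_number (numbers : List Int) (indices : List Int) : Int :=
  ((PySem.List.enumerate indices 0).foldl (pvStepA numbers) (0, -1)).1

-- ===== PORT B =====
-- B's pair loop: consume the index list two at a time, one sign per pair
def pvPairGo (numbers : List Int) : List Int → Int → Int
  | [], _ => 0
  | [i], s => s * PySem.List.pyGetD numbers (-i) 0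
  | i :: j :: rest, s =>
      s * (PySem.List.pyGetD numbers (-i) 0 + PySem.List.pyGetD numbers (-j) 0)
        + pvPairGo numbers rest (-s)

def calculate_single_number_alt (numbers : List Int) (indices : List Int) : Int :=
  pvPairGo numbers indices 1

-- ===== PRECONDITION & SPEC =====
-- Pre_ excludes exactly the inputs on which Python A raises IndexError (numbers[-index] out of range).
def Pre_calculate_single_number (numbers : List Int) (indices : List Int) : Prop :=
  ∀ i ∈ indices, PySem.Raise.InRange numbers.length (-i)
instance (numbers : List Int) (indices : List Int) : Decidable (Pre_calculate_single_number numbers indices) := by unfold Pre_calculate_single_number; infer_instance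
def pvWitness_calculate_single_number : List Int × List Int := ([1, 1, 2], [1, 2])

def Spec_calculate_single_number (numbers : List Int) (indices : List Int) (out : Int) : Prop := out = calculate_single_number_alt numbers indices
instance (numbers : List Int) (indices : List Int) (out : Int) : Decidable (Spec_calculate_single_number numbers indices out) := by unfold Spec_calculate_single_number; infer_instance

-- ===== CLAIM (what is proved, stated in full; the proofs are below) =====
def Claim_equal_calculate_single_number : Prop := ∀ (numbers : List Int) (indices : List Int), Dom_calculate_single_number numbers indices → Pre_calculate_single_number numbers indices → Spec_calculate_single_number numbers indices (calculate_single_number numbers indices)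

-- ===== LEMMAS AND PROOFS =====

-- A's fold, started at an even position n with sign state s, computes the pair sum with per-pair sign -s.
theorem pvFold_eq (numbers : List Int) :
    ∀ (l : List Int) (c s : Int) (n : Int), n % 2 = 0 →
      ((PySem.List.enumerate l n).foldl (pvStepA numbers) (c, s)).1
        = c + pvPairGo numbers l (-s)
  | [], c, s, n, _ => by simp [PySem.List.enumerate_nil, pvPairGo]
  | [i], c, s, n, h => by
      have hb : (PySem.Int.mod n 2 == 0) = true := by
        unfold PySem.Int.mod
        rw [Int.fmod_eq_emod_of_nonneg _ (by norm_num)]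
        simp; omega
      simp only [PySem.List.enumerate_cons, PySem.List.enumerate_nil, List.foldl_cons,
        List.foldl_nil, pvStepA, pvPairGo, hb, if_true]
  | i :: j :: rest, c, s, n, h => by
      have hb : (PySem.Int.mod n 2 == 0) = true := by
        unfold PySem.Int.mod
        rw [Int.fmod_eq_emod_of_nonneg _ (by norm_num)]
        simp; omega
      have hb1 : (PySem.Int.mod (n + 1) 2 == 0) = false := by
        unfold PySem.Int.mod
        rw [Int.fmod_eq_emod_of_nonneg _ (by norm_num)]
        simp; omega
      have ih := pvFold_eq numbers rest (c + -s * PySem.List.pyGetD numbers (-i) 0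
                    + -s * PySem.List.pyGetD numbers (-j) 0) (-s) (n + 1 + 1) (by omega)
      simp only [PySem.List.enumerate_cons, List.foldl_cons, pvStepA, hb, hb1,
        Bool.false_eq_true, if_true, if_false, neg_neg] at ih ⊢
      rw [ih]
      simp only [pvPairGo, neg_neg]
      ring

-- ===== VERDICT (by name: the statement is the Claim_ definition above) =====
theorem calculate_single_number_spec : Claim_equal_calculate_single_number := by
  intro numbers indices _ _
  unfold Spec_calculate_single_number calculate_single_number calculate_single_number_alt
  have := pvFold_eq numbers indices 0 (-1) 0 (by omega)
  simpa using this
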